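-- pv_equiv track=rewrite | github.com/kts5927/algorithm | 백준/Bronze/7489. 팩토리얼/팩토리얼.py | rightmost_nonzero_digit
-- ===== SOURCE A (Python) =====
-- def rightmost_nonzero_digit(t, cases):
--     results = []
--     for n in cases:
--         res = 1
--         for i in range(1, n + 1):
--             res *= i
--
--             while res % 10 == 0:
--                 res //= 10
--
--             res %= 100000
--
--         results.append(res % 10)
--
--     return results
-- ===== SOURCE B (Python) =====
-- def rightmost_nonzero_digit(t, cases):
--     # One shared sweep up to max(cases) with memoised answers, instead of
--     # restarting the factorial loop for every case.
--     wanted = set(cases)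
--     mx = max(wanted, default=0)
--     memo = {}
--     res = 1
--     for i in range(1, mx + 1):
--         res *= i
--         while res % 10 == 0:
--             res //= 10
--         res %= 100000
--         if i in wanted:
--             memo[i] = res % 10
--     return [memo[n] if n >= 1 else 1 for n in cases]
-- ===== Notes on version B (the rewrite author's own statement) =====
-- stated objective: faster
-- what changed: B replaces A's per-case restart of the factorial loop by one shared sweep up to max(cases) that memoises the answer for each requested n, so duplicated/overlapping cases are computed once.
import Mathlib
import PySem

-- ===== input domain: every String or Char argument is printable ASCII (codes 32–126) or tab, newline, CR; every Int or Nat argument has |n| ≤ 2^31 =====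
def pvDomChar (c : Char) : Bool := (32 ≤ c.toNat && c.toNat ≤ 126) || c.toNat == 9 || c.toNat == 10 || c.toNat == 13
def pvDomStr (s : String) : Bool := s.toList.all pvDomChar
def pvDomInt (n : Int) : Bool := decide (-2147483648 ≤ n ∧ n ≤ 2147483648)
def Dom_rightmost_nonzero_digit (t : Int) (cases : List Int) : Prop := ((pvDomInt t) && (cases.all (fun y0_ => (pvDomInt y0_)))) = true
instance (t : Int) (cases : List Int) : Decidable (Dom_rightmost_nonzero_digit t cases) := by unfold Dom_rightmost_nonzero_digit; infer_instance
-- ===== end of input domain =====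

-- B replaces A's per-case factorial loop by one shared memoised sweep up to max(cases) (objective: faster).

-- ===== PORT A =====
-- the `while res % 10 == 0: res //= 10` loop (both Pythons contain this statement verbatim);
-- the r = 0 branch only makes the definition total — Python loops forever there, and the
-- loop is never entered with 0 (res stays positive).
def pvStrip (r : Int) : Int :=
  if _h0 : r = 0 then 0
  else if _h : PySem.Int.mod r 10 = 0 then pvStrip (PySem.Int.floordiv r 10) else r
termination_by r.natAbs
decreasing_by
  have h := PySem.Int.floordiv_mul_add_mod r 10
  rw [_h] at h
  omega

def rightmost_nonzero_digit (t : Int) (cases : List Int) : List Int :=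
  cases.foldl (fun results n =>
    results ++ [PySem.Int.mod
      ((PySem.List.pyRange 1 (n + 1) 1).foldl
        (fun res i => PySem.Int.mod (pvStrip (res * i)) 100000) 1) 10]) []

-- ===== PORT B =====
-- `memo[n]` is always present for n ≥ 1 (n ∈ wanted and n ≤ mx), so the getD 0 default is unreachable
def rightmost_nonzero_digit_alt (t : Int) (cases : List Int) : List Int :=
  let wanted : PySem.Set Int := PySem.Set.ofList cases
  let mx : Int := PySem.List.maxD wanted (fun x => x) 0
  let sweep :=
    (PySem.List.pyRange 1 (mx + 1) 1).foldl
      (fun (st : Int × PySem.Dict Int Int) i =>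
        let res := PySem.Int.mod (pvStrip (st.1 * i)) 100000
        let memo := if PySem.Set.contains wanted i then st.2.insert i (PySem.Int.mod res 10) else st.2
        (res, memo))
      (1, PySem.Dict.empty)
  cases.map (fun n => if 1 ≤ n then (sweep.2.get? n).getD 0 else 1)

-- ===== PRECONDITION & SPEC =====
def Spec_rightmost_nonzero_digit (t : Int) (cases : List Int) (out : List Int) : Prop := out = rightmost_nonzero_digit_alt t cases
instance (t : Int) (cases : List Int) (out : List Int) : Decidable (Spec_rightmost_nonzero_digit t cases out) := by unfold Spec_rightmost_nonzero_digit; infer_instance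

-- ===== CLAIM (what is proved, stated in full; the proofs are below) =====
def Claim_equal_rightmost_nonzero_digit : Prop := ∀ (t : Int) (cases : List Int), Dom_rightmost_nonzero_digit t cases → Spec_rightmost_nonzero_digit t cases (rightmost_nonzero_digit t cases)

-- ===== LEMMAS AND PROOFS =====

-- the value A's inner loop computes for a single case n
def pvG (n : Int) : Int :=
  (PySem.List.pyRange 1 (n + 1) 1).foldl
    (fun res i => PySem.Int.mod (pvStrip (res * i)) 100000) 1

theorem pvG_nonpos {n : Int} (h : n ≤ 0) : pvG n = 1 := by
  unfold pvG
  rw [PySem.List.pyRange_one_eq_nil (by omega)]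
  rfl

theorem pvG_succ (j : Nat) :
    pvG ((j : Int) + 1)
      = PySem.Int.mod (pvStrip (pvG (j : Int) * ((j : Int) + 1))) 100000 := by
  unfold pvG
  rw [PySem.List.pyRange_one_succ_right (by omega : (1:Int) ≤ (j : Int) + 1),
    List.foldl_append]
  rfl

theorem pvA_foldl (cases : List Int) (acc : List Int) :
    cases.foldl (fun results n =>
      results ++ [PySem.Int.mod
        ((PySem.List.pyRange 1 (n + 1) 1).foldl
          (fun res i => PySem.Int.mod (pvStrip (res * i)) 100000) 1) 10]) acc
    = acc ++ cases.map (fun n => PySem.Int.mod (pvG n) 10) := by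
  induction cases generalizing acc with
  | nil => simp
  | cons x xs ih =>
    rw [List.foldl_cons, ih]
    simp [pvG]

-- the sweep invariant: after processing i = 1..j, res = pvG j and memo holds
-- the answer for every wanted k in 1..j
theorem pvSweep_invariant (wanted : PySem.Set Int) (j : Nat) :
    (((PySem.List.pyRange 1 ((j : Int) + 1) 1).foldl
        (fun (st : Int × PySem.Dict Int Int) i =>
          let res := PySem.Int.mod (pvStrip (st.1 * i)) 100000
          let memo := if PySem.Set.contains wanted i then st.2.insert i (PySem.Int.mod res 10) else st.2
          (res, memo))
        (1, PySem.Dict.empty)).1 = pvG (j : Int))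
    ∧ (∀ k : Int, 1 ≤ k → k ≤ (j : Int) → PySem.Set.contains wanted k = true →
        ((PySem.List.pyRange 1 ((j : Int) + 1) 1).foldl
          (fun (st : Int × PySem.Dict Int Int) i =>
            let res := PySem.Int.mod (pvStrip (st.1 * i)) 100000
            let memo := if PySem.Set.contains wanted i then st.2.insert i (PySem.Int.mod res 10) else st.2
            (res, memo))
          (1, PySem.Dict.empty)).2.get? k = some (PySem.Int.mod (pvG k) 10)) := by
  induction j with
  | zero =>
    constructor
    · simp [PySem.List.pyRange_one_eq_nil, pvG_nonpos]
    · intro k h1 h2 _; omega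
  | succ j ih =>
    rw [show ((j + 1 : Nat) : Int) + 1 = ((j : Int) + 1) + 1 by push_cast; ring,
      PySem.List.pyRange_one_succ_right (by omega : (1:Int) ≤ (j : Int) + 1),
      List.foldl_append]
    obtain ⟨ihres, ihmemo⟩ := ih
    constructor
    · simp only [List.foldl_cons, List.foldl_nil, ihres]
      rw [show ((j + 1 : Nat) : Int) = (j : Int) + 1 by push_cast; ring, pvG_succ]
    · intro k h1 h2 hc
      simp only [List.foldl_cons, List.foldl_nil, ihres]
      by_cases hk : k = (j : Int) + 1
      · subst hk
        simp only [hc, if_true]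
        rw [PySem.Dict.get?_insert_self, pvG_succ]
        
      · have hk2 : k ≤ (j : Int) := by push_cast at h2; omega
        have hrest := ihmemo k h1 hk2 hc
        split
        · rw [PySem.Dict.get?_insert_of_ne _ _ hk, hrest]
        · exact hrest

theorem pvB_elem (cases : List Int) (n : Int) (hn : n ∈ cases) :
    (if 1 ≤ n
      then (((PySem.List.pyRange 1 (PySem.List.maxD (PySem.Set.ofList cases) (fun x => x) 0 + 1) 1).foldl
        (fun (st : Int × PySem.Dict Int Int) i =>
          let res := PySem.Int.mod (pvStrip (st.1 * i)) 100000
          let memo := if PySem.Set.contains (PySem.Set.ofList cases) i then st.2.insert i (PySem.Int.mod res 10) else st.2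
          (res, memo))
        (1, PySem.Dict.empty)).2.get? n).getD 0
      else 1)
    = PySem.Int.mod (pvG n) 10 := by
  by_cases h1 : 1 ≤ n
  · simp only [h1, if_true]
    -- n is wanted and n ≤ mx
    have hw : n ∈ PySem.Set.ofList cases := (PySem.Set.mem_ofList cases n).2 hn
    have hne : PySem.Set.ofList cases ≠ [] := by
      intro h; rw [h] at hw; simp at hw
    obtain ⟨m, hm⟩ : ∃ m, PySem.List.max? (PySem.Set.ofList cases) (fun x => x) = some m := by
      cases hmx : PySem.List.max? (PySem.Set.ofList cases) (fun x => x) with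
      | none => exact absurd ((PySem.List.max?_eq_none_iff _ _).1 hmx) hne
      | some m => exact ⟨m, rfl⟩
    have hle : n ≤ m := PySem.List.max?_isMax hm n hw
    have hmx : PySem.List.maxD (PySem.Set.ofList cases) (fun x => x) 0 = m := by
      simp [PySem.List.maxD, hm]
    rw [hmx]
    have hm1 : 1 ≤ m := le_trans h1 hle
    have hcast : m = ((m.toNat : Nat) : Int) := by omega
    rw [hcast]
    have := (pvSweep_invariant (PySem.Set.ofList cases) m.toNat).2 n h1 (by omega)
      (by simpa [PySem.Set.contains] using hw)
    rw [this]
    rfl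
  · have hn0 : n ≤ 0 := by omega
    simp [h1, pvG_nonpos hn0]

-- ===== VERDICT (by name: the statement is the Claim_ definition above) =====
theorem rightmost_nonzero_digit_spec : Claim_equal_rightmost_nonzero_digit := by
  intro t cases _
  unfold Spec_rightmost_nonzero_digit rightmost_nonzero_digit rightmost_nonzero_digit_alt
  rw [pvA_foldl, List.nil_append]
  apply List.map_congr_left
  intro n hn
  exact (pvB_elem cases n hn).symm
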